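-- pv_equiv track=rewrite | github.com/Kim-Myeongseop/coding_practice | 프로그래머스/0/181918. 배열 만들기 4/배열 만들기 4.py | solution
-- ===== SOURCE A (Python) =====
-- def solution(arr):
--     stk = []
--     arr_len = len(arr)
--     i = 0
--     while i < arr_len:
--         if not stk or stk[-1] < arr[i]:
--             stk.append(arr[i])
--             i += 1
--         else:
--             stk.pop()
--     return stk
-- ===== SOURCE B (Python) =====
-- def solution(arr):
--     # An element survives A's stack process iff it is strictly smaller than
--     # every element after it; so one suffix-minimum scan suffices, no stack.
--     res = []
--     m = None
--     for x in reversed(arr):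
--         if m is None or x < m:
--             res.append(x)
--             m = x
--     res.reverse()
--     return res
-- ===== Notes on version B (the rewrite author's own statement) =====
-- stated objective: alternative
-- what changed: Replaces A's stack simulation (push/pop driven by a non-advancing index) with a stackless right-to-left suffix-minimum scan: an element is kept iff it is strictly smaller than the running minimum of the elements after it, then the collected list is reversed; no pops, each element is examined once.
import Mathlib
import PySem

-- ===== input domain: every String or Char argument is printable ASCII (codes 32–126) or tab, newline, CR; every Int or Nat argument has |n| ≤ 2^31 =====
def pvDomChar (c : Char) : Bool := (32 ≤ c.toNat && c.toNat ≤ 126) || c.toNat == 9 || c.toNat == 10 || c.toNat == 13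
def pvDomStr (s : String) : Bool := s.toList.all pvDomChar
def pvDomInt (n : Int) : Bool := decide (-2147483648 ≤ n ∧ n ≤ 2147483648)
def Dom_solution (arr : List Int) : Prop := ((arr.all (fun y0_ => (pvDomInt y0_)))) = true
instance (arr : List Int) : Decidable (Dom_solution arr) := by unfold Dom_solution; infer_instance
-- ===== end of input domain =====

-- B replaces A's stack simulation with a stackless right-to-left suffix-minimum scan (same return value).

-- ===== PORT A =====
-- A's while loop: at each step either push arr[i] and advance i, or pop without advancing.
def solutionLoop (arr : List Int) (i : Nat) (stk : List Int) : List Int :=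
  if h : i < arr.length then
    match hm : stk.getLast? with
    | none => solutionLoop arr (i + 1) (stk ++ [arr[i]])
    | some t =>
      if t < arr[i] then solutionLoop arr (i + 1) (stk ++ [arr[i]])
      else solutionLoop arr i stk.dropLast
  else stk
termination_by 2 * (arr.length - i) + stk.length
decreasing_by
  · simp; omega
  · simp; omega
  · have hs : stk ≠ [] := by intro hnil; simp [hnil] at hm
    have h0 : 0 < stk.length := List.length_pos_iff.mpr hs
    simp [List.length_dropLast]; omega

def solution (arr : List Int) : List Int := solutionLoop arr 0 []

-- ===== PORT B =====
-- 'for x in reversed(arr): if m is None or x < m: res.append(x); m = x', then res.reverse()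
def solution_alt (arr : List Int) : List Int :=
  (arr.reverse.foldl
    (fun (p : List Int × Option Int) x =>
      match p.2 with
      | none => (p.1 ++ [x], some x)
      | some m => if x < m then (p.1 ++ [x], some x) else p)
    ([], none)).1.reverse

-- ===== PRECONDITION & SPEC =====
def Spec_solution (arr : List Int) (out : List Int) : Prop := out = solution_alt arr
instance (arr : List Int) (out : List Int) : Decidable (Spec_solution arr out) := by unfold Spec_solution; infer_instance

-- ===== CLAIM (what is proved, stated in full; the proofs are below) =====
def Claim_equal_solution : Prop := ∀ (arr : List Int), Dom_solution arr → Spec_solution arr (solution arr)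

-- ===== LEMMAS AND PROOFS =====

-- Common functional spec: keep x iff it is strictly below every later element.
def keepSuffixMin : List Int → List Int
  | [] => []
  | x :: xs => if xs.all (fun y => decide (x < y)) then x :: keepSuffixMin xs else keepSuffixMin xs

-- A's popping phase: pop while the last element is ≥ x.
def popGE (stk : List Int) (x : Int) : List Int :=
  match h : stk.getLast? with
  | none => stk
  | some t => if t ≥ x then popGE stk.dropLast x else stk
termination_by stk.length
decreasing_by
  have hs : stk ≠ [] := by intro hnil; simp [hnil] at h
  have : 0 < stk.length := List.length_pos_iff.mpr hs
  simp [List.length_dropLast]; omega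

theorem solutionLoop_step (arr : List Int) (i : Nat) (stk : List Int) (h : i < arr.length) :
    solutionLoop arr i stk = solutionLoop arr (i + 1) (popGE stk arr[i] ++ [arr[i]]) := by
  induction stk using popGE.induct (x := arr[i]) with
  | case1 stk hnone =>
      rw [solutionLoop.eq_def, popGE, hnone]
      simp [h]
  | case2 stk t hsome hge ih =>
      rw [solutionLoop.eq_def, popGE, hsome]
      simp only [h, dite_true, hge, if_pos]
      have hlt : ¬ t < arr[i] := by omega
      simp [hlt, ih]
  | case3 stk t hsome hge =>
      rw [solutionLoop.eq_def, popGE, hsome]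
      have hlt : t < arr[i] := by omega
      simp [h, hlt, hge]

theorem solutionLoop_foldl (arr : List Int) (i : Nat) (stk : List Int) :
    solutionLoop arr i stk =
      (arr.drop i).foldl (fun s x => popGE s x ++ [x]) stk := by
  by_cases h : i < arr.length
  · rw [solutionLoop_step arr i stk h,
        List.drop_eq_getElem_cons h, List.foldl_cons]
    exact solutionLoop_foldl arr (i + 1) (popGE stk arr[i] ++ [arr[i]])
  · rw [solutionLoop.eq_def]
    simp [h, List.drop_eq_nil_of_le (le_of_not_gt h)]
termination_by arr.length - i
decreasing_by omega

-- On a strictly increasing stack, popping-from-the-end while ≥ x is filtering to < x.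
theorem popGE_filter (stk : List Int) (x : Int) (hs : stk.Pairwise (· < ·)) :
    popGE stk x = stk.filter (fun s => decide (s < x)) := by
  induction stk using popGE.induct (x := x) with
  | case1 stk hnone =>
      have : stk = [] := by
        cases stk with
        | nil => rfl
        | cons a l => simp [List.getLast?_concat] at hnone
      simp [popGE, hnone, this]
  | case2 stk t hsome hge ih =>
      have hne : stk ≠ [] := by intro hnil; simp [hnil] at hsome
      have hdec : stk = stk.dropLast ++ [t] := by
        have := List.dropLast_concat_getLast hne
        rw [List.getLast?_eq_getLast hne] at hsome
        simp [← Option.some_inj.mp hsome, this]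
      have hsd : stk.dropLast.Pairwise (· < ·) :=
        hs.sublist (List.dropLast_sublist stk)
      rw [popGE, hsome]
      simp only [hge, if_pos]
      rw [ih hsd]
      conv_rhs => rw [hdec]
      have : ¬ (t < x) := by omega
      simp [List.filter_append, this]
  | case3 stk t hsome hge =>
      have hne : stk ≠ [] := by intro hnil; simp [hnil] at hsome
      have hdec : stk = stk.dropLast ++ [t] := by
        have := List.dropLast_concat_getLast hne
        rw [List.getLast?_eq_getLast hne] at hsome
        simp [← Option.some_inj.mp hsome, this]
      rw [popGE, hsome]
      simp only [hge, if_neg, if_false]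
      have ht : t < x := by omega
      have hall : ∀ s ∈ stk, s < x := by
        intro s hmem
        rw [hdec] at hs hmem
        rcases List.mem_append.mp hmem with h1 | h1
        · have := (List.pairwise_append.mp hs).2.2 s h1 t (by simp)
          omega
        · simp at h1; omega
      rw [List.filter_eq_self.mpr (by intro s hmem; simpa using hall s hmem)]

-- A's fold, from any strictly increasing stack, keeps the stack elements below all of l and appends keepSuffixMin l.
theorem foldA_spec (l : List Int) (stk : List Int) (hs : stk.Pairwise (· < ·)) :
    l.foldl (fun s x => popGE s x ++ [x]) stk =
      stk.filter (fun s => l.all (fun y => decide (s < y))) ++ keepSuffixMin l := by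
  induction l generalizing stk with
  | nil => simp [keepSuffixMin]
  | cons x xs ih =>
      rw [List.foldl_cons, popGE_filter stk x hs]
      have hs' : (stk.filter (fun s => decide (s < x)) ++ [x]).Pairwise (· < ·) := by
        rw [List.pairwise_append]
        refine ⟨hs.filter _, by simp, ?_⟩
        intro a ha b hb
        simp at ha hb
        omega
      rw [ih _ hs']
      rw [List.filter_append, List.filter_filter]
      by_cases hx : xs.all (fun y => decide (x < y))
      · simp only [keepSuffixMin, if_pos hx]
        simp [hx, List.append_assoc, Bool.and_comm]
      · simp only [keepSuffixMin, if_neg hx]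
        simp [hx, List.append_assoc, Bool.and_comm]

theorem solution_eq_keep (arr : List Int) : solution arr = keepSuffixMin arr := by
  rw [solution, solutionLoop_foldl]
  simpa using foldA_spec arr [] (by simp)

-- B's fold (read as a foldr over arr): the list is keepSuffixMin reversed, and the
-- Option holds a minimum of the processed suffix (none iff empty).
theorem foldB_spec (l : List Int) :
    (l.foldr
      (fun x (p : List Int × Option Int) =>
        match p.2 with
        | none => (p.1 ++ [x], some x)
        | some m => if x < m then (p.1 ++ [x], some x) else p)
      ([], none)).1 = (keepSuffixMin l).reverse ∧
    (((l.foldr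
      (fun x (p : List Int × Option Int) =>
        match p.2 with
        | none => (p.1 ++ [x], some x)
        | some m => if x < m then (p.1 ++ [x], some x) else p)
      ([], none)).2 = none ∧ l = []) ∨
     ∃ v, (l.foldr
      (fun x (p : List Int × Option Int) =>
        match p.2 with
        | none => (p.1 ++ [x], some x)
        | some m => if x < m then (p.1 ++ [x], some x) else p)
      ([], none)).2 = some v ∧ v ∈ l ∧ ∀ y ∈ l, v ≤ y) := by
  induction l with
  | nil => simp [keepSuffixMin]
  | cons x xs ih =>
      obtain ⟨h1, h2⟩ := ih
      rw [List.foldr_cons]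
      rcases h2 with ⟨hn, hnil⟩ | ⟨v, hv, hvmem, hvmin⟩
      · subst hnil
        simp [keepSuffixMin]
      · rw [hv]
        by_cases hlt : x < v
        · have hall : xs.all (fun y => decide (x < y)) = true := by
            simp only [List.all_eq_true, decide_eq_true_eq]
            intro y hy; have := hvmin y hy; omega
          constructor
          · simp [hlt, h1, keepSuffixMin, hall]
          · refine Or.inr ⟨x, by simp [hlt], by simp, ?_⟩
            intro y hy
            rcases List.mem_cons.mp hy with rfl | hy
            · omega
            · have := hvmin y hy; omega
        · have hall : ¬ (xs.all (fun y => decide (x < y)) = true) := by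
            simp only [List.all_eq_true, decide_eq_true_eq]
            intro hforall
            exact hlt (lt_of_lt_of_le (hforall v hvmem) (le_refl v)) |>.elim
          constructor
          · simp [hlt, h1, keepSuffixMin, hall]
          · refine Or.inr ⟨v, by simp [hlt, hv], by simp [hvmem], ?_⟩
            intro y hy
            rcases List.mem_cons.mp hy with rfl | hy
            · omega
            · exact hvmin y hy

theorem solution_alt_eq_keep (arr : List Int) : solution_alt arr = keepSuffixMin arr := by
  rw [solution_alt, List.foldl_reverse]
  rw [(foldB_spec arr).1]
  simp

-- ===== VERDICT (by name: the statement is the Claim_ definition above) =====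
theorem solution_spec : Claim_equal_solution := by
  intro arr _
  unfold Spec_solution
  rw [solution_eq_keep, solution_alt_eq_keep]
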